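-- pv_equiv track=rewrite | github.com/pavtiger/SymbolsAnalyse | symbol_operate.py | recursive_filter_branches
-- ===== SOURCE A (Python) =====
-- def recursive_filter_branches(all_branches, layer, index, eps, length):
--     if layer + 1 >= len(all_branches):
--         return [index]
--
--     best = []
--
--     for j in range(len(all_branches[layer + 1])):
--         if abs(all_branches[layer][index] - all_branches[layer + 1][j]) < eps:
--             returned = recursive_filter_branches(all_branches, layer + 1, j, eps, length + 1)
--             if (len(returned) + 1) > len(best):
--                 best = [index] + returned
--
--     # if layer + 2 < len(all_branches):
--     #     for j in range(len(all_branches[layer + 2])):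
--     #         if abs(all_branches[layer][index] - all_branches[layer + 2][j]) < eps:
--     #             returned = recursive_filter_branches(all_branches, layer + 2, j, eps, length + 1)
--     #             if (len(returned) + 1) > len(best):
--     #                 best = returned + [index]
--
--     return best
-- ===== SOURCE B (Python) =====
-- def recursive_filter_branches(all_branches, layer, index, eps, length):
--     n = len(all_branches)
--     if layer + 1 >= n:
--         return [index]
--     # bottom-up DP: lens[l][i] = length of the longest near-equal chain starting at (l, i)
--     lens = {n - 1: [1] * len(all_branches[n - 1])}
--     for l in range(n - 2, layer - 1, -1):
--         nxt, nlens = all_branches[l + 1], lens[l + 1]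
--         lens[l] = [1 + max((nlens[j] for j in range(len(nxt)) if abs(v - nxt[j]) < eps),
--                            default=-1)
--                    for v in all_branches[l]]
--     if lens[layer][index] == 0:
--         return []
--     # walk forward, at each step taking the first valid successor of maximal chain length
--     res, l, i = [], layer, index
--     while True:
--         res.append(i)
--         if l + 1 >= n:
--             return res
--         v, nxt, nlens = all_branches[l][i], all_branches[l + 1], lens[l + 1]
--         cand = [j for j in range(len(nxt)) if abs(v - nxt[j]) < eps]
--         j = max(cand, key=lambda t: nlens[t])
--         if nlens[j] == 0:
--             return res
--         l, i = l + 1, j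
-- ===== Notes on version B (the rewrite author's own statement) =====
-- stated objective: alternative
-- what changed: A finds the chain by plain top-down recursion re-exploring subtrees; B is a bottom-up dynamic program that tabulates the best chain length at every (layer, index) once and then reconstructs the chain with a single forward walk taking the first valid successor of maximal length.
-- outside the precondition, e.g. on recursive_filter_branches([[1], [1], [1]], -1, 0, 5, 0): A returns [0, 0, 0, 0], B returns [0, 0, 0, 0]; on recursive_filter_branches([[2, 0], [2, 7, 2], [], [], [], [1, 1]], 2, 2, 5, 9): A returns [], B raises IndexError
import Mathlib
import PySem

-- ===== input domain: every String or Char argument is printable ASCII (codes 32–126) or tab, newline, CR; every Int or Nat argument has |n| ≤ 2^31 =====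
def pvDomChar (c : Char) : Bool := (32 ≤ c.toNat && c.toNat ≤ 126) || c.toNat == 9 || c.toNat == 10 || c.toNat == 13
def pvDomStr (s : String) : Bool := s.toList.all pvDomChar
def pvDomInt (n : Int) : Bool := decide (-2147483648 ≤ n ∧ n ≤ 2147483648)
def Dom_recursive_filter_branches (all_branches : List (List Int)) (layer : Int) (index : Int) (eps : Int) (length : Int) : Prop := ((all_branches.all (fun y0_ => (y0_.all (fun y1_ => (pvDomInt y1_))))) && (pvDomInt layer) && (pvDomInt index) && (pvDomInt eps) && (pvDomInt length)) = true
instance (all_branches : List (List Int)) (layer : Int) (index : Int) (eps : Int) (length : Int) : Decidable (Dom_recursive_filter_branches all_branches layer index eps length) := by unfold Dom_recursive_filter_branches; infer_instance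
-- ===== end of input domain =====

-- B replaces A's top-down recursion by a bottom-up DP table of chain lengths plus a single
-- forward reconstruction walk (a different algorithm of the same result); equivalence of
-- RETURN values is proved on Pre_ below.

-- ===== PORT A =====
-- literal transliteration of A's recursion; the Nat fuel only makes the (terminating)
-- Python recursion structurally total — it never runs out on inputs satisfying Pre_
def pvGoA (ab : List (List Int)) (eps : Int) : Nat → Int → Int → Int → List Int
  | 0, _, index, _ => [index]
  | fuel+1, layer, index, length =>
    if (ab.length : Int) ≤ layer + 1 then [index]
    else
      let row1 := (PySem.List.pyGet? ab (layer + 1)).getD []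
      let cur := (PySem.List.pyGet? ((PySem.List.pyGet? ab layer).getD []) index).getD 0
      (List.range row1.length).foldl
        (fun best j =>
          if |cur - row1.getD j 0| < eps then
            let returned := pvGoA ab eps fuel (layer + 1) (j : Int) (length + 1)
            if best.length < returned.length + 1 then index :: returned else best
          else best) []

def recursive_filter_branches (all_branches : List (List Int)) (layer : Int) (index : Int) (eps : Int) (length : Int) : List Int :=
  pvGoA all_branches eps (all_branches.length + layer.natAbs + 1) layer index length

-- ===== PORT B =====
-- nlens[t] lookup used by the max(..., key=...) scan
def pvKeyB (nlens : List Int) (t : Int) : Int := (PySem.List.pyGet? nlens t).getD 0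

-- the DP table: lens[l][i] = length of the longest chain starting at (l, i)
def pvLensB (ab : List (List Int)) (eps : Int) (layer : Int) : PySem.Dict Int (List Int) :=
  let d0 := (PySem.Dict.empty).insert ((ab.length : Int) - 1)
      (List.replicate ((PySem.List.pyGet? ab ((ab.length : Int) - 1)).getD []).length 1)
  (PySem.List.pyRange ((ab.length : Int) - 2) (layer - 1) (-1)).foldl
    (fun lens l =>
      let nxt := (PySem.List.pyGet? ab (l + 1)).getD []
      let nlens := lens.getD (l + 1) []
      let row := (PySem.List.pyGet? ab l).getD []
      -- max(gen, default=-1) is the running max from -1 (all table entries are ≥ 0)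
      lens.insert l (row.map (fun v =>
        1 + ((List.range nxt.length).filterMap
              (fun j => if |v - nxt.getD j 0| < eps then some (nlens.getD j 0) else none)).foldl max (-1))))
    d0

-- the forward reconstruction walk; fuel only for totality, never exhausted on Pre_;
-- Python's max(cand, key=...) (first maximum) is the foldl scan; max([]) would raise
-- ValueError in Python — that branch is unreachable on Pre_ (proved below)
def pvWalkB (ab : List (List Int)) (eps : Int) (lens : PySem.Dict Int (List Int)) : Nat → Int → Int → List Int → List Int
  | 0, _, _, res => res
  | fuel+1, l, i, res =>
    let res' := res ++ [i]
    if (ab.length : Int) ≤ l + 1 then res'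
    else
      let v := (PySem.List.pyGet? ((PySem.List.pyGet? ab l).getD []) i).getD 0
      let nxt := (PySem.List.pyGet? ab (l + 1)).getD []
      let nlens := lens.getD (l + 1) []
      let cand := (List.range nxt.length).filterMap
        (fun j => if |v - nxt.getD j 0| < eps then some ((j : Nat) : Int) else none)
      match cand with
      | [] => res'
      | c0 :: cs =>
        let j := cs.foldl (fun b t => if pvKeyB nlens b < pvKeyB nlens t then t else b) c0
        if pvKeyB nlens j = 0 then res' else pvWalkB ab eps lens fuel (l + 1) j res'

def recursive_filter_branches_alt (all_branches : List (List Int)) (layer : Int) (index : Int) (eps : Int) (length : Int) : List Int :=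
  if (all_branches.length : Int) ≤ layer + 1 then [index]
  else
    let lens := pvLensB all_branches eps layer
    let top := (PySem.List.pyGet? (lens.getD layer []) index).getD 0
    if top = 0 then []
    else pvWalkB all_branches eps lens (all_branches.length + layer.natAbs + 1) layer index []

-- ===== PRECONDITION & SPEC =====
-- Pre_ excludes calls that reach the recursive branch with a negative layer (there A only
-- returns by walking the layer list through Python's negative-index wraparound, an accident
-- of representation — B happens to agree on the tested wrap cases but the behaviour is
-- unspecified) or with an index outside [-len(row), len(row)): there A usually raises
-- IndexError, but when the next row is empty A returns [] without ever reading the invalid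
-- index — an accident of its lazy evaluation order — while B's table lookup raises IndexError.
def Pre_recursive_filter_branches (all_branches : List (List Int)) (layer : Int) (index : Int) (eps : Int) (length : Int) : Prop :=
  (all_branches.length : Int) ≤ layer + 1 ∨
  (0 ≤ layer ∧ PySem.Raise.InRange ((PySem.List.pyGet? all_branches layer).getD []).length index)
instance (all_branches : List (List Int)) (layer : Int) (index : Int) (eps : Int) (length : Int) : Decidable (Pre_recursive_filter_branches all_branches layer index eps length) := by unfold Pre_recursive_filter_branches; infer_instance

def pvWitness_recursive_filter_branches : List (List Int) × Int × Int × Int × Int := ([[1], [1]], 0, 0, 2, 0)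

def Spec_recursive_filter_branches (all_branches : List (List Int)) (layer : Int) (index : Int) (eps : Int) (length : Int) (out : List Int) : Prop := out = recursive_filter_branches_alt all_branches layer index eps length
instance (all_branches : List (List Int)) (layer : Int) (index : Int) (eps : Int) (length : Int) (out : List Int) : Decidable (Spec_recursive_filter_branches all_branches layer index eps length out) := by unfold Spec_recursive_filter_branches; infer_instance

-- ===== CLAIM (what is proved, stated in full; the proofs are below) =====
def Claim_equal_recursive_filter_branches : Prop := ∀ (all_branches : List (List Int)) (layer : Int) (index : Int) (eps : Int) (length : Int), Dom_recursive_filter_branches all_branches layer index eps length → Pre_recursive_filter_branches all_branches layer index eps length → Spec_recursive_filter_branches all_branches layer index eps length (recursive_filter_branches all_branches layer index eps length)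

-- ===== LEMMAS AND PROOFS =====

-- value at (l, i) (i may be a negative in-range Python index at the top call)
def pvVAt (ab : List (List Int)) (l : Nat) (i : Int) : Int :=
  (PySem.List.pyGet? (ab.getD l []) i).getD 0

-- reference chain (mirrors A, fuelled structurally; fuel `ab.length - l` is canonical)
def pvChainF (ab : List (List Int)) (eps : Int) : Nat → Nat → Int → Int → List Int
  | 0, _, i, _ => [i]
  | k+1, l, i, v =>
    if ab.length ≤ l + 1 then [i]
    else
      (List.range (ab.getD (l+1) []).length).foldl
        (fun best j =>
          if |v - (ab.getD (l+1) []).getD j 0| < eps then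
            (if best.length < (pvChainF ab eps k (l+1) (j : Int) ((ab.getD (l+1) []).getD j 0)).length + 1
             then i :: pvChainF ab eps k (l+1) (j : Int) ((ab.getD (l+1) []).getD j 0) else best)
          else best) []

-- reference chain length (mirrors B's DP formula)
def pvLenF (ab : List (List Int)) (eps : Int) : Nat → Nat → Int → Int
  | 0, _, _ => 1
  | k+1, l, v =>
    if ab.length ≤ l + 1 then 1
    else
      1 + ((List.range (ab.getD (l+1) []).length).filterMap
            (fun j => if |v - (ab.getD (l+1) []).getD j 0| < eps
              then some (pvLenF ab eps k (l+1) ((ab.getD (l+1) []).getD j 0)) else none)).foldl max (-1)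

-- the "first strict argmax" selection both programs perform, as an abstract fold
def pvKeyOf (key : Nat → Int) (b : Option Nat) : Int :=
  match b with | none => -1 | some j => key j

def pvAbs (i : Int) (g : Nat → List Int) (b : Option Nat) : List Int :=
  match b with | none => [] | some j => i :: g j

def pvSel (p : Nat → Prop) [DecidablePred p] (key : Nat → Int) (js : List Nat) (b : Option Nat) : Option Nat :=
  js.foldl (fun acc j => if p j ∧ pvKeyOf key acc < key j then some j else acc) b

-- A's inner loop is the abstract selection
theorem pvFoldA_eq (p : Nat → Prop) [DecidablePred p] (key : Nat → Int) (i : Int) (g : Nat → List Int)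
    (hk : ∀ j, key j = ((g j).length : Int)) :
    ∀ (js : List Nat) (b : Option Nat),
      js.foldl (fun best j => if p j then
          (if best.length < (g j).length + 1 then i :: g j else best) else best) (pvAbs i g b)
        = pvAbs i g (pvSel p key js b) := by
  intro js
  induction js with
  | nil => intro b; rfl
  | cons j js ih =>
    intro b
    simp only [List.foldl_cons, pvSel]
    have hiff : ((pvAbs i g b).length < (g j).length + 1) ↔ pvKeyOf key b < key j := by
      cases b with
      | none =>
        simp only [pvAbs, pvKeyOf, List.length_nil]
        rw [hk j]
        omega
      | some j' =>
        simp only [pvAbs, pvKeyOf, List.length_cons]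
        rw [hk j', hk j]
        omega
    by_cases hp : p j
    · rw [if_pos hp]
      by_cases hlt : pvKeyOf key b < key j
      · rw [if_pos (hiff.mpr hlt), if_pos ⟨hp, hlt⟩]
        exact ih (some j)
      · rw [if_neg (fun hc => hlt (hiff.mp hc)), if_neg (fun hc => hlt hc.2)]
        exact ih b
    · rw [if_neg hp, if_neg (fun hc => hp hc.1)]
      exact ih b

-- the max over the valid keys is the key of the selection
theorem pvMax_eq (p : Nat → Prop) [DecidablePred p] (key : Nat → Int)
    (hnn : ∀ j, 0 ≤ key j) :
    ∀ (js : List Nat) (b : Option Nat),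
      (js.filterMap (fun j => if p j then some (key j) else none)).foldl max (pvKeyOf key b)
        = pvKeyOf key (pvSel p key js b) := by
  intro js
  induction js with
  | nil => intro b; rfl
  | cons j js ih =>
    intro b
    simp only [List.filterMap_cons, pvSel, List.foldl_cons]
    by_cases hp : p j
    · rw [if_pos hp]
      simp only [List.foldl_cons]
      by_cases hlt : pvKeyOf key b < key j
      · rw [if_pos ⟨hp, hlt⟩, show max (pvKeyOf key b) (key j) = key j from by omega]
        exact ih (some j)
      · rw [if_neg (fun hc => hlt hc.2), show max (pvKeyOf key b) (key j) = pvKeyOf key b from by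
          omega]
        exact ih b
    · rw [if_neg hp, if_neg (fun hc => hp hc.1)]
      exact ih b

-- the selection started from `some j0` is the plain first-argmax scan over the candidates
theorem pvSel_some (p : Nat → Prop) [DecidablePred p] (key : Nat → Int) :
    ∀ (js : List Nat) (j0 : Nat),
      pvSel p key js (some j0)
        = some ((js.filterMap (fun j => if p j then some j else none)).foldl
            (fun b t => if key b < key t then t else b) j0) := by
  intro js
  induction js with
  | nil => intro j0; rfl
  | cons j js ih =>
    intro j0
    simp only [pvSel, List.foldl_cons, List.filterMap_cons]
    by_cases hp : p j
    · rw [if_pos hp]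
      simp only [List.foldl_cons]
      by_cases hlt : key j0 < key j
      · rw [if_pos ⟨hp, hlt⟩, if_pos hlt]
        exact ih j
      · rw [if_neg (fun hc => hlt hc.2), if_neg hlt]
        exact ih j0
    · rw [if_neg (fun hc => hp hc.1), if_neg hp]
      exact ih j0

theorem pvSel_none (p : Nat → Prop) [DecidablePred p] (key : Nat → Int)
    (hnn : ∀ j, 0 ≤ key j) :
    ∀ (js : List Nat),
      pvSel p key js none
        = match js.filterMap (fun j => if p j then some j else none) with
          | [] => none
          | c0 :: cs => some (cs.foldl (fun b t => if key b < key t then t else b) c0) := by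
  intro js
  induction js with
  | nil => rfl
  | cons j js ih =>
    simp only [pvSel, List.foldl_cons, List.filterMap_cons]
    by_cases hp : p j
    · rw [if_pos hp, if_pos ⟨hp, by rw [show pvKeyOf key none = -1 from rfl]; have := hnn j; omega⟩]
      exact pvSel_some p key js j
    · rw [if_neg (fun hc => hp hc.1), if_neg hp]
      exact ih
theorem pvLenF_nonneg (ab : List (List Int)) (eps : Int) :
    ∀ (k : Nat) (l : Nat) (v : Int), 0 ≤ pvLenF ab eps k l v := by
  intro k
  induction k with
  | zero => intro l v; simp [pvLenF]
  | succ k _ =>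
    intro l v
    unfold pvLenF
    by_cases hcase : ab.length ≤ l + 1
    · rw [if_pos hcase]; omega
    · rw [if_neg hcase]
      have := (PySem.List.le_foldl_max
        ((List.range (ab.getD (l+1) []).length).filterMap
          (fun j => if |v - (ab.getD (l+1) []).getD j 0| < eps
            then some (pvLenF ab eps k (l+1) ((ab.getD (l+1) []).getD j 0)) else none)) (-1)).1
      omega

theorem pvChainF_length (ab : List (List Int)) (eps : Int) :
    ∀ (k : Nat) (l : Nat) (i v : Int),
      ((pvChainF ab eps k l i v).length : Int) = pvLenF ab eps k l v := by
  intro k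
  induction k with
  | zero => intro l i v; simp [pvChainF, pvLenF]
  | succ k ih =>
    intro l i v
    unfold pvChainF pvLenF
    by_cases hcase : ab.length ≤ l + 1
    · rw [if_pos hcase, if_pos hcase]; simp
    · rw [if_neg hcase, if_neg hcase]
      have hA := pvFoldA_eq (fun j => |v - (ab.getD (l+1) []).getD j 0| < eps)
        (fun j => pvLenF ab eps k (l+1) ((ab.getD (l+1) []).getD j 0)) i
        (fun j => pvChainF ab eps k (l+1) (j : Int) ((ab.getD (l+1) []).getD j 0))
        (fun j => (ih (l+1) (j : Int) ((ab.getD (l+1) []).getD j 0)).symm)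
        (List.range (ab.getD (l+1) []).length) none
      have hM := pvMax_eq (fun j => |v - (ab.getD (l+1) []).getD j 0| < eps)
        (fun j => pvLenF ab eps k (l+1) ((ab.getD (l+1) []).getD j 0))
        (fun j => pvLenF_nonneg ab eps k (l+1) ((ab.getD (l+1) []).getD j 0))
        (List.range (ab.getD (l+1) []).length) none
      rw [show pvAbs i (fun j => pvChainF ab eps k (l+1) (j : Int) ((ab.getD (l+1) []).getD j 0)) none = [] from rfl] at hA
      rw [show pvKeyOf (fun j => pvLenF ab eps k (l+1) ((ab.getD (l+1) []).getD j 0)) none = -1 from rfl] at hM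
      rw [hA, hM]
      cases hsel : pvSel (fun j => |v - (ab.getD (l+1) []).getD j 0| < eps)
          (fun j => pvLenF ab eps k (l+1) ((ab.getD (l+1) []).getD j 0))
          (List.range (ab.getD (l+1) []).length) none with
      | none => simp [pvAbs, pvKeyOf]
      | some j =>
        simp only [pvAbs, pvKeyOf, List.length_cons]
        have := ih (l+1) (j : Int) ((ab.getD (l+1) []).getD j 0)
        push_cast
        omega

-- A's port computes the reference chain (fuel is irrelevant once sufficient)
theorem pvGoA_eq (ab : List (List Int)) (eps : Int) :
    ∀ (fuel : Nat) (l : Nat) (i : Int) (length : Int), ab.length ≤ l + fuel →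
      pvGoA ab eps fuel (l : Int) i length
        = pvChainF ab eps (ab.length - l) l i (pvVAt ab l i) := by
  intro fuel
  induction fuel with
  | zero =>
    intro l i length h
    have : ab.length - l = 0 := by omega
    simp [pvGoA, this, pvChainF]
  | succ fuel ih =>
    intro l i length h
    by_cases hle : (ab.length : Int) ≤ (l : Int) + 1
    · have hle' : ab.length ≤ l + 1 := by exact_mod_cast hle
      cases hnl : ab.length - l with
      | zero => simp [pvGoA, hle, pvChainF]
      | succ k =>
        have hk0 : k = 0 := by omega
        subst hk0
        simp [pvGoA, hle, pvChainF, hle']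
    · have hlt : l + 1 < ab.length := by
        have : ¬ ab.length ≤ l + 1 := by
          intro hc; exact hle (by exact_mod_cast hc)
        omega
      have hnl : ab.length - l = (ab.length - (l+1)) + 1 := by omega
      rw [hnl]
      simp only [pvGoA, hle, if_neg, not_false_iff]
      unfold pvChainF
      have hle'' : ¬ ab.length ≤ l + 1 := by omega
      simp only [hle'', if_neg, not_false_iff]
      have hrow : (PySem.List.pyGet? ab ((l : Int) + 1)).getD [] = ab.getD (l+1) [] := by
        have hc : (l : Int) + 1 = ((l + 1 : Nat) : Int) := by push_cast; ring
        rw [hc, PySem.List.pyGet?_natCast]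
        simp [List.getD_eq_getElem?_getD]
      have hcur : (PySem.List.pyGet? ((PySem.List.pyGet? ab (l : Int)).getD []) i).getD 0 = pvVAt ab l i := by
        rw [PySem.List.pyGet?_natCast, pvVAt]
        simp [List.getD_eq_getElem?_getD]
      rw [hrow, hcur]
      apply PySem.List.foldl_congr_mem
      intro best j hj
      by_cases hpj : |pvVAt ab l i - (ab.getD (l + 1) []).getD j 0| < eps
      · rw [if_pos hpj, if_pos hpj]
        have h1 : (l : Int) + 1 = ((l + 1 : Nat) : Int) := by push_cast; ring
        rw [h1, ih (l+1) (j : Int) (length + 1) (by omega)]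
        have h2 : pvVAt ab (l+1) (j : Int) = (ab.getD (l + 1) []).getD j 0 := by
          rw [pvVAt, PySem.List.pyGet?_natCast]
          simp [List.getD_eq_getElem?_getD]
        rw [h2]
      · rw [if_neg hpj, if_neg hpj]

-- the scan result is one of the candidates
theorem pvScan_mem (key : Nat → Int) :
    ∀ (cs : List Nat) (c0 : Nat),
      cs.foldl (fun b t => if key b < key t then t else b) c0 ∈ c0 :: cs := by
  intro cs
  induction cs with
  | nil => intro c0; simp
  | cons t cs ih =>
    intro c0
    simp only [List.foldl_cons]
    by_cases hlt : key c0 < key t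
    · rw [if_pos hlt]
      rcases List.mem_cons.mp (ih t) with h | h
      · rw [h]; simp
      · simp [h]
    · rw [if_neg hlt]
      rcases List.mem_cons.mp (ih c0) with h | h
      · rw [h]; simp
      · simp [h]

-- the Int scan B performs over the cast candidates equals the cast of the Nat scan
theorem pvScan_cast (key : Nat → Int) (keyB : Int → Int) :
    ∀ (cs : List Nat) (c0 : Nat), (∀ t ∈ c0 :: cs, keyB (t : Int) = key t) →
      (cs.map (fun t : Nat => (t : Int))).foldl (fun b t => if keyB b < keyB t then t else b) (c0 : Int)
        = ((cs.foldl (fun b t => if key b < key t then t else b) c0 : Nat) : Int) := by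
  intro cs
  induction cs with
  | nil => intro c0 _; rfl
  | cons t cs ih =>
    intro c0 h
    have hc0 := h c0 (by simp)
    have ht := h t (by simp)
    simp only [List.map_cons, List.foldl_cons, hc0, ht]
    by_cases hlt : key c0 < key t
    · rw [if_pos hlt, if_pos hlt]
      exact ih t (by
        intro x hx
        rcases List.mem_cons.mp hx with h1 | h1
        · exact h x (by rw [h1]; simp)
        · exact h x (by simp [h1]))
    · rw [if_neg hlt, if_neg hlt]
      exact ih c0 (by
        intro x hx
        rcases List.mem_cons.mp hx with h1 | h1
        · exact h x (by rw [h1]; simp)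
        · exact h x (by simp [h1]))

-- Python list indexing commutes with map
theorem pvPyGet?_map (f : Int → Int) (xs : List Int) (i : Int) :
    PySem.List.pyGet? (xs.map f) i = (PySem.List.pyGet? xs i).map f := by
  simp [PySem.List.pyGet?, PySem.List.pyIdx?]

theorem pvGetD_map (f : Int → Int) (xs : List Int) (j : Nat) (hj : j < xs.length) :
    (xs.map f).getD j 0 = f (xs.getD j 0) := by
  rw [List.getD_eq_getElem?_getD, List.getD_eq_getElem?_getD, List.getElem?_map,
    List.getElem?_eq_getElem hj]
  simp

-- the DP table contains the reference lengths for every layer from `layer` up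
theorem pvLensB_fold (ab : List (List Int)) (eps : Int) (L : Nat) (hL : L + 1 < ab.length) :
    ∀ (m : Nat) (d : PySem.Dict Int (List Int)),
      L + m ≤ ab.length - 1 →
      (∀ l : Nat, L + m ≤ l → l < ab.length →
        d.getD (l : Int) [] = (ab.getD l []).map (fun v => pvLenF ab eps (ab.length - l) l v)) →
      ∀ l : Nat, L ≤ l → l < ab.length →
        ((PySem.List.pyRange ((L : Int) + m - 1) ((L : Int) - 1) (-1)).foldl
          (fun lens l =>
            let nxt := (PySem.List.pyGet? ab (l + 1)).getD []
            let nlens := lens.getD (l + 1) []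
            let row := (PySem.List.pyGet? ab l).getD []
            lens.insert l (row.map (fun v =>
              1 + ((List.range nxt.length).filterMap
                    (fun j => if |v - nxt.getD j 0| < eps then some (nlens.getD j 0) else none)).foldl max (-1))))
          d).getD (l : Int) []
        = (ab.getD l []).map (fun v => pvLenF ab eps (ab.length - l) l v) := by
  intro m
  induction m with
  | zero =>
    intro d _ hd l hl1 hl2
    rw [PySem.List.pyRange_neg_one_eq_nil (by omega)]
    exact hd l (by omega) hl2
  | succ m ih =>
    intro d hm hd l hl1 hl2
    have hcons : PySem.List.pyRange ((L : Int) + ((m+1 : Nat) : Int) - 1) ((L : Int) - 1) (-1)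
        = ((L : Int) + m) :: PySem.List.pyRange ((L : Int) + m - 1) ((L : Int) - 1) (-1) := by
      have hc : (L : Int) + ((m+1 : Nat) : Int) - 1 = (L : Int) + m := by push_cast; ring
      rw [hc, PySem.List.pyRange_neg_one_cons (by omega)]
    rw [hcons, List.foldl_cons]
    refine ih _ (by omega) ?_ l hl1 hl2
    intro t ht1 ht2
    dsimp only
    have hcast : ((L : Int) + m) = ((L + m : Nat) : Int) := by push_cast; ring
    rw [hcast, PySem.Dict.getD_insert]
    by_cases heq : t = L + m
    · rw [if_pos (by rw [heq]), ← heq]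
      have hsucc : t + 1 < ab.length := by omega
      have hx1 : ((t : Nat) : Int) + 1 = ((t + 1 : Nat) : Int) := by push_cast; ring
      rw [hx1, PySem.List.pyGet?_natCast, PySem.List.pyGet?_natCast]
      rw [hd (t + 1) (by omega) hsucc]
      simp only [← List.getD_eq_getElem?_getD]
      congr 1
      funext v
      have hnl : ab.length - t = (ab.length - (t+1)) + 1 := by omega
      rw [hnl]
      conv_rhs => rw [pvLenF]
      rw [if_neg (by omega : ¬ ab.length ≤ t + 1)]
      congr 2
      all_goals first
      | (apply List.filterMap_congr
         intro j hj
         have hjlt : j < (ab.getD (t+1) []).length := List.mem_range.mp hj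
         rw [pvGetD_map (fun v => pvLenF ab eps (ab.length - (t+1)) (t+1) v) (ab.getD (t+1) []) j hjlt])
      | simp
    · rw [if_neg (by
        intro hc
        exact heq (by exact_mod_cast hc))]
      exact hd t (by omega) ht2

theorem pvLensB_eq (ab : List (List Int)) (eps : Int) (L : Nat) (hL : L + 1 < ab.length) :
    ∀ l : Nat, L ≤ l → l < ab.length →
      (pvLensB ab eps (L : Int)).getD (l : Int) []
        = (ab.getD l []).map (fun v => pvLenF ab eps (ab.length - l) l v) := by
  intro l hl1 hl2
  unfold pvLensB
  have hrange : (ab.length : Int) - 2 = (L : Int) + (ab.length - 1 - L : Nat) - 1 := by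
    push_cast [Nat.cast_sub (by omega : L ≤ ab.length - 1), Nat.cast_sub (by omega : 1 ≤ ab.length)]
    ring
  rw [hrange]
  refine pvLensB_fold ab eps L hL (ab.length - 1 - L) _ (by omega) ?_ l hl1 hl2
  intro t ht1 ht2
  have ht : t = ab.length - 1 := by omega
  subst ht
  have hcast : (ab.length : Int) - 1 = ((ab.length - 1 : Nat) : Int) := by
    push_cast [Nat.cast_sub (by omega : 1 ≤ ab.length)]; ring
  rw [hcast, PySem.Dict.getD_insert, if_pos rfl, PySem.List.pyGet?_natCast]
  simp only [← List.getD_eq_getElem?_getD]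
  have hnl : ab.length - (ab.length - 1) = 1 := by omega
  rw [hnl]
  have h1 : ∀ v : Int, pvLenF ab eps 1 (ab.length - 1) v = 1 := by
    intro v; unfold pvLenF; rw [if_pos (by omega : ab.length ≤ (ab.length - 1) + 1)]
  symm
  apply List.eq_replicate_iff.mpr
  refine ⟨by simp, ?_⟩
  intro x hx
  obtain ⟨v, _, hv⟩ := List.mem_map.mp hx
  rw [← hv, h1 v]

-- cast/filterMap bookkeeping: B's candidate list is the cast of the abstract one
theorem pvCand_cast (p : Nat → Prop) [DecidablePred p] (m : Nat) :
    (List.range m).filterMap (fun j => if p j then some ((j : Nat) : Int) else none)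
      = ((List.range m).filterMap (fun j => if p j then some j else none)).map (fun t : Nat => (t : Int)) := by
  rw [List.map_filterMap]
  apply List.filterMap_congr
  intro j _
  by_cases hp : p j <;> simp [hp]

theorem pvKeys_map (p : Nat → Prop) [DecidablePred p] (key : Nat → Int) (m : Nat) :
    (List.range m).filterMap (fun j => if p j then some (key j) else none)
      = ((List.range m).filterMap (fun j => if p j then some j else none)).map key := by
  rw [List.map_filterMap]
  apply List.filterMap_congr
  intro j _
  by_cases hp : p j <;> simp [hp]

theorem pvCand_mem (p : Nat → Prop) [DecidablePred p] (m : Nat) (j : Nat)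
    (h : j ∈ (List.range m).filterMap (fun j => if p j then some j else none)) :
    p j ∧ j < m := by
  rw [List.mem_filterMap] at h
  obtain ⟨a, ha, hj⟩ := h
  by_cases hp : p a
  · simp [hp] at hj; subst hj; exact ⟨hp, List.mem_range.mp ha⟩
  · simp [hp] at hj

-- the walk reproduces the reference chain
theorem pvWalkB_eq (ab : List (List Int)) (eps : Int) (L : Nat) (hL : L + 1 < ab.length) :
    ∀ (fuel : Nat) (l : Nat) (i : Int) (res : List Int),
      ab.length ≤ l + fuel → L ≤ l → l < ab.length →
      0 < pvLenF ab eps (ab.length - l) l (pvVAt ab l i) →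
      pvWalkB ab eps (pvLensB ab eps (L : Int)) fuel (l : Int) i res
        = res ++ pvChainF ab eps (ab.length - l) l i (pvVAt ab l i) := by
  intro fuel
  induction fuel with
  | zero => intro l i res h _ hl2 _; omega
  | succ fuel ih =>
    intro l i res hfuel hl1 hl2 hpos
    by_cases hle : (ab.length : Int) ≤ (l : Int) + 1
    · have hle' : ab.length ≤ l + 1 := by exact_mod_cast hle
      have hnl : ab.length - l = 1 := by omega
      rw [hnl]
      simp only [pvWalkB]
      rw [if_pos hle]
      unfold pvChainF
      rw [if_pos hle']
    · have hlt : l + 1 < ab.length := by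
        have : ¬ ab.length ≤ l + 1 := fun hc => hle (by exact_mod_cast hc)
        omega
      have hnle : ¬ ab.length ≤ l + 1 := by omega
      have hnl : ab.length - l = (ab.length - (l+1)) + 1 := by omega
      simp only [pvWalkB]
      rw [if_neg hle]
      have hcastl : (l : Int) + 1 = ((l + 1 : Nat) : Int) := by push_cast; ring
      have hveq : (PySem.List.pyGet? ((PySem.List.pyGet? ab (l : Int)).getD []) i).getD 0 = pvVAt ab l i := by
        rw [PySem.List.pyGet?_natCast, pvVAt]
        simp [List.getD_eq_getElem?_getD]
      have hnxt : (PySem.List.pyGet? ab ((l : Int) + 1)).getD [] = ab.getD (l+1) [] := by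
        rw [hcastl, PySem.List.pyGet?_natCast]
        simp [List.getD_eq_getElem?_getD]
      have hnlens : (pvLensB ab eps (L : Int)).getD ((l : Int) + 1) []
          = (ab.getD (l+1) []).map (fun w => pvLenF ab eps (ab.length - (l+1)) (l+1) w) := by
        rw [hcastl]
        have := pvLensB_eq ab eps L hL (l+1) (by omega) hlt
        rw [show ab.length - (l+1) = ab.length - (l+1) from rfl] at this
        exact this
      rw [hveq, hnxt, hnlens]
      rw [pvCand_cast (fun j => |pvVAt ab l i - (ab.getD (l+1) []).getD j 0| < eps) (ab.getD (l+1) []).length]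
      have hlenval : pvLenF ab eps (ab.length - l) l (pvVAt ab l i)
          = 1 + ((List.range (ab.getD (l+1) []).length).filterMap
              (fun j => if |pvVAt ab l i - (ab.getD (l+1) []).getD j 0| < eps
                then some (pvLenF ab eps (ab.length - (l+1)) (l+1) ((ab.getD (l+1) []).getD j 0)) else none)).foldl max (-1) := by
        rw [hnl]
        conv_lhs => rw [pvLenF]
        rw [if_neg hnle]
      cases hcand : (List.range (ab.getD (l+1) []).length).filterMap
          (fun j => if |pvVAt ab l i - (ab.getD (l+1) []).getD j 0| < eps then some j else none) with
      | nil =>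
        exfalso
        rw [hlenval, pvKeys_map (fun j => |pvVAt ab l i - (ab.getD (l+1) []).getD j 0| < eps)
            (fun j => pvLenF ab eps (ab.length - (l+1)) (l+1) ((ab.getD (l+1) []).getD j 0)), hcand] at hpos
        simp at hpos
      | cons c0 cs =>
        simp only [List.map_cons]
        have hmemall : ∀ t ∈ c0 :: cs,
            (|pvVAt ab l i - (ab.getD (l+1) []).getD t 0| < eps) ∧ t < (ab.getD (l+1) []).length := by
          intro t ht
          exact pvCand_mem _ _ t (hcand ▸ ht)
        have hkB : ∀ t : Nat, t < (ab.getD (l+1) []).length →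
            pvKeyB ((ab.getD (l+1) []).map (fun w => pvLenF ab eps (ab.length - (l+1)) (l+1) w)) ((t : Nat) : Int)
              = pvLenF ab eps (ab.length - (l+1)) (l+1) ((ab.getD (l+1) []).getD t 0) := by
          intro t ht
          rw [pvKeyB, PySem.List.pyGet?_natCast, List.getElem?_map, List.getElem?_eq_getElem ht]
          conv_rhs => rw [List.getD_eq_getElem?_getD, List.getElem?_eq_getElem ht]
          simp
        have hscan := pvScan_cast (fun t => pvLenF ab eps (ab.length - (l+1)) (l+1) ((ab.getD (l+1) []).getD t 0))
            (pvKeyB ((ab.getD (l+1) []).map (fun w => pvLenF ab eps (ab.length - (l+1)) (l+1) w)))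
            cs c0 (fun t ht => hkB t (hmemall t ht).2)
        rw [hscan]
        have hjmem := pvScan_mem (fun t => pvLenF ab eps (ab.length - (l+1)) (l+1) ((ab.getD (l+1) []).getD t 0)) cs c0
        set jN := cs.foldl (fun b t => if pvLenF ab eps (ab.length - (l+1)) (l+1) ((ab.getD (l+1) []).getD b 0)
            < pvLenF ab eps (ab.length - (l+1)) (l+1) ((ab.getD (l+1) []).getD t 0) then t else b) c0 with hjNdef
        have hjprop := hmemall jN hjmem
        rw [hkB jN hjprop.2]
        have hchain : pvChainF ab eps (ab.length - l) l i (pvVAt ab l i)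
            = pvAbs i (fun j => pvChainF ab eps (ab.length - (l+1)) (l+1) (j : Int) ((ab.getD (l+1) []).getD j 0))
                (pvSel (fun j => |pvVAt ab l i - (ab.getD (l+1) []).getD j 0| < eps)
                  (fun j => pvLenF ab eps (ab.length - (l+1)) (l+1) ((ab.getD (l+1) []).getD j 0))
                  (List.range (ab.getD (l+1) []).length) none) := by
          rw [hnl]
          conv_lhs => rw [pvChainF]
          rw [if_neg hnle]
          have hA := pvFoldA_eq (fun j => |pvVAt ab l i - (ab.getD (l+1) []).getD j 0| < eps)
            (fun j => pvLenF ab eps (ab.length - (l+1)) (l+1) ((ab.getD (l+1) []).getD j 0)) i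
            (fun j => pvChainF ab eps (ab.length - (l+1)) (l+1) (j : Int) ((ab.getD (l+1) []).getD j 0))
            (fun j => (pvChainF_length ab eps (ab.length - (l+1)) (l+1) (j : Int) ((ab.getD (l+1) []).getD j 0)).symm)
            (List.range (ab.getD (l+1) []).length) none
          rw [show pvAbs i (fun j => pvChainF ab eps (ab.length - (l+1)) (l+1) (j : Int) ((ab.getD (l+1) []).getD j 0)) none
              = [] from rfl] at hA
          exact hA
        have hsel : pvSel (fun j => |pvVAt ab l i - (ab.getD (l+1) []).getD j 0| < eps)
            (fun j => pvLenF ab eps (ab.length - (l+1)) (l+1) ((ab.getD (l+1) []).getD j 0))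
            (List.range (ab.getD (l+1) []).length) none = some jN := by
          rw [pvSel_none _ _ (fun j => pvLenF_nonneg ab eps (ab.length - (l+1)) (l+1) ((ab.getD (l+1) []).getD j 0))
            (List.range (ab.getD (l+1) []).length), hcand]
        rw [hsel] at hchain
        rw [show pvAbs i (fun j => pvChainF ab eps (ab.length - (l+1)) (l+1) (j : Int) ((ab.getD (l+1) []).getD j 0)) (some jN)
            = i :: pvChainF ab eps (ab.length - (l+1)) (l+1) (jN : Int) ((ab.getD (l+1) []).getD jN 0) from rfl] at hchain
        have h2 : pvVAt ab (l+1) (jN : Int) = (ab.getD (l+1) []).getD jN 0 := by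
          rw [pvVAt, PySem.List.pyGet?_natCast]
          simp [List.getD_eq_getElem?_getD]
        by_cases hz : pvLenF ab eps (ab.length - (l+1)) (l+1) ((ab.getD (l+1) []).getD jN 0) = 0
        · rw [if_pos hz, hchain]
          have hg0 : (pvChainF ab eps (ab.length - (l+1)) (l+1) (jN : Int) ((ab.getD (l+1) []).getD jN 0)).length = 0 := by
            have := pvChainF_length ab eps (ab.length - (l+1)) (l+1) (jN : Int) ((ab.getD (l+1) []).getD jN 0)
            omega
          rw [List.length_eq_zero_iff] at hg0
          rw [hg0]
        · rw [if_neg hz]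
          have hposN : 0 < pvLenF ab eps (ab.length - (l+1)) (l+1) (pvVAt ab (l+1) (jN : Int)) := by
            rw [h2]
            have := pvLenF_nonneg ab eps (ab.length - (l+1)) (l+1) ((ab.getD (l+1) []).getD jN 0)
            omega
          rw [hcastl, ih (l+1) (jN : Int) (res ++ [i]) (by omega) (by omega) hlt hposN]
          rw [h2, hchain]
          simp

-- ===== VERDICT (by name: the statement is the Claim_ definition above) =====
theorem recursive_filter_branches_spec : Claim_equal_recursive_filter_branches := by
  intro ab layer index eps length _ hpre
  unfold Spec_recursive_filter_branches recursive_filter_branches recursive_filter_branches_alt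
  by_cases hle : (ab.length : Int) ≤ layer + 1
  · simp only [hle, if_pos]
    unfold pvGoA
    simp [hle]
  · rcases hpre with hpre | ⟨hl0, hir⟩
    · exact absurd hpre hle
    · simp only [hle, if_neg, not_false_iff]
      set L := layer.toNat with hLdef
      have hlay : layer = (L : Int) := (Int.toNat_of_nonneg hl0).symm
      have hL1 : L + 1 < ab.length := by
        have : ¬ ab.length ≤ L + 1 := by
          intro hc
          apply hle
          rw [hlay]
          exact_mod_cast hc
        omega
      have hA : pvGoA ab eps (ab.length + layer.natAbs + 1) layer index length
          = pvChainF ab eps (ab.length - L) L index (pvVAt ab L index) := by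
        rw [hlay]
        exact pvGoA_eq ab eps (ab.length + ((L : Int)).natAbs + 1) L index length (by omega)
      rw [hA]
      have hrow : (PySem.List.pyGet? ab layer).getD [] = ab.getD L [] := by
        rw [hlay, PySem.List.pyGet?_natCast, List.getD_eq_getElem?_getD]
      have hlens : (pvLensB ab eps layer).getD layer []
          = (ab.getD L []).map (fun v => pvLenF ab eps (ab.length - L) L v) := by
        rw [hlay]
        exact pvLensB_eq ab eps L hL1 L (le_refl L) (by omega)
      rw [hlens]
      -- the top lookup: pyGet? through the map, using the in-range index
      have hir' : PySem.Raise.InRange (ab.getD L []).length index := by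
        rw [hrow] at hir; exact hir
      obtain ⟨w, hw⟩ : ∃ w, PySem.List.pyGet? (ab.getD L []) index = some w := by
        cases hg : PySem.List.pyGet? (ab.getD L []) index with
        | none =>
          exfalso
          exact ((PySem.List.pyGet?_eq_none_iff _ _).mp hg) hir'
        | some w => exact ⟨w, rfl⟩
      have hmapget : PySem.List.pyGet?
            ((ab.getD L []).map (fun v => pvLenF ab eps (ab.length - L) L v)) index
          = some (pvLenF ab eps (ab.length - L) L w) := by
        rw [pvPyGet?_map, hw, Option.map_some]
      have hvw : pvVAt ab L index = w := by
        rw [pvVAt, hw]; rfl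
      rw [hmapget]
      simp only [Option.getD_some]
      by_cases hz : pvLenF ab eps (ab.length - L) L w = 0
      · simp only [hz, if_pos]
        have := pvChainF_length ab eps (ab.length - L) L index (pvVAt ab L index)
        rw [hvw, hz] at this
        have hlen0 : (pvChainF ab eps (ab.length - L) L index (pvVAt ab L index)).length = 0 := by
          rw [hvw]; omega
        rw [List.length_eq_zero_iff] at hlen0
        rw [hvw] at hlen0 ⊢
        exact hlen0
      · simp only [hz, if_neg, not_false_iff]
        have hpos : 0 < pvLenF ab eps (ab.length - L) L (pvVAt ab L index) := by
          rw [hvw]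
          have := pvLenF_nonneg ab eps (ab.length - L) L w
          omega
        rw [hlay]
        rw [pvWalkB_eq ab eps L hL1 (ab.length + ((L : Int)).natAbs + 1) L index [] (by omega) (le_refl L) (by omega) hpos]
        simp
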